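-- pv_equiv track=rewrite | github.com/appugowdahc/HackerRank_problems | easy_problems/happy-ladybugs.py | can_make_ladybugs_happy
-- ===== SOURCE A (Python) =====
-- from collections import Counter
--
-- def can_make_ladybugs_happy(board):
--
--     ladybug_count = Counter(board)
--     if '_' in ladybug_count:
--         del ladybug_count['_']
--
--     if any(count == 1 for count in ladybug_count.values()):
--         return "NO"
--
--     if '_' not in board:
--         for i in range(1, len(board) - 1):
--             if board[i] != board[i - 1] and board[i] != board[i + 1]:
--                 return "NO"
--         if board[0] != board[1] or board[-1] != board[-2]:
--             return "NO"
--
--     return "YES"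
-- ===== SOURCE B (Python) =====
-- from collections import Counter
-- from itertools import groupby
--
-- def can_make_ladybugs_happy(board):
--     counts = Counter(board)
--     counts.pop('_', None)
--     if any(c == 1 for c in counts.values()):
--         return "NO"
--     if '_' not in board:
--         for _, group in groupby(board):
--             if sum(1 for _ in group) < 2:
--                 return "NO"
--     return "YES"
-- ===== Notes on version B (the rewrite author's own statement) =====
-- stated objective: idiomatic
-- what changed: The per-index neighbour loop plus separate endpoint checks is replaced by an itertools.groupby run-length scan (a bug is happy iff its maximal run of equal colours has length >= 2); the Counter frequency check stays, with del-after-membership-test replaced by dict.pop.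
import Mathlib
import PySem

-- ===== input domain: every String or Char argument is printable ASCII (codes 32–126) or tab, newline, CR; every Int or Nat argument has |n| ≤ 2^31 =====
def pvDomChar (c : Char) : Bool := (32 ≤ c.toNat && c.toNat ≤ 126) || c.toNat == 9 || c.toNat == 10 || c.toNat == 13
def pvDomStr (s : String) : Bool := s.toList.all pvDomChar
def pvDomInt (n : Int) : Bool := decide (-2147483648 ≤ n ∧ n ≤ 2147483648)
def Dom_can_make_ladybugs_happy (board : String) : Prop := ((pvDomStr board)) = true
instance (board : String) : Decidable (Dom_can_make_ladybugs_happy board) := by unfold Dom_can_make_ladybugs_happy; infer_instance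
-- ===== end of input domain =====

-- B replaces A's index-based neighbour loop by a run-length (groupby) check: idiomatic, same cost.

-- ===== PORT A =====
def can_make_ladybugs_happy (board : String) : String :=
  let l := board.toList
  let cnt0 := PySem.Dict.counter l
  let cnt := if cnt0.contains '_' then cnt0.erase '_' else cnt0
  if (PySem.Dict.values cnt).any (fun v => v == 1) then "NO"
  else if !(PySem.Chars.isIn ['_'] l) then
    if (PySem.List.pyRange 1 ((l.length : Int) - 1) 1).any (fun i =>
         (PySem.List.pyGet? l i != PySem.List.pyGet? l (i - 1)) &&
         (PySem.List.pyGet? l i != PySem.List.pyGet? l (i + 1))) then "NO"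
    else if (PySem.List.pyGet? l 0 != PySem.List.pyGet? l 1) ||
            (PySem.List.pyGet? l (-1) != PySem.List.pyGet? l (-2)) then "NO"
    else "YES"
  else "YES"

-- ===== PORT B =====
-- itertools.groupby(board) as the list of (char, run length) of the maximal runs
def pvGroupsGo : Char → Nat → List Char → List (Char × Nat)
  | c, n, [] => [(c, n)]
  | c, n, x :: xs => if x = c then pvGroupsGo c (n + 1) xs else (c, n) :: pvGroupsGo x 1 xs

def pvGroups : List Char → List (Char × Nat)
  | [] => []
  | c :: cs => pvGroupsGo c 1 cs

def can_make_ladybugs_happy_alt (board : String) : String :=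
  let l := board.toList
  let cnt := (PySem.Dict.counter l).erase '_'
  if (PySem.Dict.values cnt).any (fun v => v == 1) then "NO"
  else if !(PySem.Chars.isIn ['_'] l) then
    if (pvGroups l).any (fun p => p.2 < 2) then "NO" else "YES"
  else "YES"

-- ===== PRECONDITION & SPEC =====
-- Pre_ excludes only the empty string, on which the Python A raises IndexError (board[0]).
def Pre_can_make_ladybugs_happy (board : String) : Prop := board ≠ ""
instance (board : String) : Decidable (Pre_can_make_ladybugs_happy board) := by
  unfold Pre_can_make_ladybugs_happy; infer_instance

def pvWitness_can_make_ladybugs_happy : String := "AABB"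

def Spec_can_make_ladybugs_happy (board : String) (out : String) : Prop := out = can_make_ladybugs_happy_alt board
instance (board : String) (out : String) : Decidable (Spec_can_make_ladybugs_happy board out) := by unfold Spec_can_make_ladybugs_happy; infer_instance

-- ===== CLAIM (what is proved, stated in full; the proofs are below) =====
def Claim_equal_can_make_ladybugs_happy : Prop := ∀ (board : String), Dom_can_make_ladybugs_happy board → Pre_can_make_ladybugs_happy board → Spec_can_make_ladybugs_happy board (can_make_ladybugs_happy board)

-- ===== LEMMAS AND PROOFS =====

theorem pv_erase_not_contains (d : PySem.Dict Char Int) (k : Char) (h : d.contains k = false) :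
    d.erase k = d := by
  apply PySem.Dict.ext
  simp only [PySem.Dict.erase]
  simp only [PySem.Dict.contains, List.any_eq_false] at h
  apply List.filter_eq_self.mpr
  intro p hp
  simpa using h p hp

-- position i holds a ladybug with no equal neighbour
def pvLonely (l : List Char) (i : Nat) : Prop :=
  i < l.length ∧ (i = 0 ∨ l[i-1]? ≠ l[i]?) ∧ l[i+1]? ≠ l[i]?

theorem pvGroupsGo_eq (c : Char) (cs : List Char) (n : Nat) :
    pvGroupsGo c n cs = (c, n + (cs.takeWhile (· == c)).length) :: pvGroups (cs.dropWhile (· == c)) := by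
  induction cs generalizing n with
  | nil => simp [pvGroupsGo, pvGroups]
  | cons x xs ih =>
    by_cases hx : x = c
    · subst hx
      simp [pvGroupsGo, ih]
      omega
    · simp [pvGroupsGo, hx, pvGroups]

theorem pv_dropWhile_head {p : Char → Bool} {l : List Char} {d : Char} {t' : List Char}
    (h : l.dropWhile p = d :: t') : p d = false := by
  induction l with
  | nil => simp at h
  | cons x xs ih =>
    rw [List.dropWhile_cons] at h
    by_cases hx : p x = true
    · exact ih (by simpa [hx] using h)
    · simp [hx] at h
      simp [← h.1]; simpa using hx

theorem pv_get_run (c : Char) (r t : List Char) (hr : ∀ x ∈ r, x = c) :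
    ∀ i ≤ r.length, (c :: (r ++ t))[i]? = some c := by
  intro i hi
  cases i with
  | zero => simp
  | succ j =>
    have hj : j < r.length := by omega
    simp only [List.getElem?_cons_succ]
    rw [List.getElem?_append_left hj, List.getElem?_eq_getElem hj]
    exact congrArg some (hr _ (List.getElem_mem hj))

theorem pv_get_tail (c : Char) (r t : List Char) (i : Nat) :
    (c :: (r ++ t))[r.length + 1 + i]? = t[i]? := by
  have : r.length + 1 + i = (r.length + i) + 1 := by omega
  rw [this]
  simp only [List.getElem?_cons_succ]
  rw [List.getElem?_append_right (by omega)]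
  congr 1
  omega

theorem pvLemB_step (c : Char) (r t : List Char) (hr : ∀ x ∈ r, x = c)
    (hth : ∀ d t', t = d :: t' → d ≠ c)
    (IHt : ((pvGroups t).any (fun p => p.2 < 2)) = true ↔ ∃ i, pvLonely t i)
    (cs : List Char) (hcs : r ++ t = cs) :
    ((decide (1 + r.length < 2)) || (pvGroups t).any (fun p => p.2 < 2)) = true
      ↔ ∃ i, pvLonely (c :: cs) i := by
  subst hcs
  rcases Nat.eq_zero_or_pos r.length with hnr | hnr
  · have hr0 : r = [] := List.eq_nil_of_length_eq_zero hnr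
    subst hr0
    simp only [List.length_nil]
    constructor
    · intro _
      refine ⟨0, by simp, Or.inl rfl, ?_⟩
      cases t with
      | nil => simp
      | cons d t' =>
        have : d ≠ c := hth d t' rfl
        simp [this]
    · intro _; simp
  · have hd : (decide (1 + r.length < 2)) = false := decide_eq_false (by omega)
    rw [hd, Bool.false_or, IHt]
    have len : (c :: (r ++ t)).length = r.length + 1 + t.length := by simp; omega
    have getA := pv_get_run c r t hr
    have getB := pv_get_tail c r t
    constructor
    · rintro ⟨i, hi, hl, hrgt⟩
      refine ⟨r.length + 1 + i, by rw [len]; omega, Or.inr ?_, ?_⟩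
      · cases i with
        | zero =>
          have e : r.length + 1 + 0 - 1 = r.length := by omega
          rw [e, getA r.length (Nat.le_refl _), getB 0]
          cases t with
          | nil => simp at hi
          | cons d t' =>
            have hd : d ≠ c := hth d t' rfl
            simp [Ne.symm hd]
        | succ k =>
          have e : r.length + 1 + (k + 1) - 1 = r.length + 1 + k := by omega
          rw [e, getB k, getB (k + 1)]
          rcases hl with h0 | hne
          · exact absurd h0 (Nat.succ_ne_zero k)
          · simpa using hne
      · have e : r.length + 1 + i + 1 = r.length + 1 + (i + 1) := by omega
        rw [e, getB (i + 1), getB i]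
        exact hrgt
    · rintro ⟨j, hj, hl, hrgt⟩
      rw [len] at hj
      by_cases hjn : j ≤ r.length
      · exfalso
        cases j with
        | zero =>
          rw [getA 0 (by omega), getA 1 (by omega)] at hrgt
          exact hrgt rfl
        | succ k =>
          rcases hl with h0 | hne
          · exact absurd h0 (Nat.succ_ne_zero k)
          · have e : k + 1 - 1 = k := by omega
            rw [e, getA k (by omega), getA (k + 1) hjn] at hne
            exact hne rfl
      · obtain ⟨i, hji⟩ : ∃ i, j = r.length + 1 + i := ⟨j - r.length - 1, by omega⟩
        refine ⟨i, by omega, ?_, ?_⟩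
        · rcases Nat.eq_zero_or_pos i with h0 | hpos
          · exact Or.inl h0
          · rcases hl with h0 | hne
            · omega
            · refine Or.inr ?_
              have e1 : j - 1 = r.length + 1 + (i - 1) := by omega
              rw [e1, getB, hji, getB] at hne
              exact hne
        · have e1 : j + 1 = r.length + 1 + (i + 1) := by omega
          rw [e1, getB, hji, getB] at hrgt
          exact hrgt

theorem pvLemB (l : List Char) :
    ((pvGroups l).any (fun p => p.2 < 2)) = true ↔ ∃ i, pvLonely l i := by
  induction hn : l.length using Nat.strong_induction_on generalizing l with
  | _ n IH =>
  cases l with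
  | nil => simp [pvGroups, pvLonely]
  | cons c cs =>
    have hcs : cs.takeWhile (· == c) ++ cs.dropWhile (· == c) = cs :=
      List.takeWhile_append_dropWhile
    have hr : ∀ x ∈ cs.takeWhile (· == c), x = c := by
      intro x hx
      simpa using List.mem_takeWhile_imp hx
    have hth : ∀ d t', cs.dropWhile (· == c) = d :: t' → d ≠ c := by
      intro d t' h
      simpa using pv_dropWhile_head h
    have hlt : (cs.dropWhile (· == c)).length < n := by
      have := List.length_dropWhile_le (· == c) cs
      simp at hn; omega
    have IHt := IH _ hlt (cs.dropWhile (· == c)) rfl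
    have step := pvLemB_step c (cs.takeWhile (· == c)) (cs.dropWhile (· == c)) hr hth IHt cs hcs
    show ((pvGroupsGo c 1 cs).any (fun p => p.2 < 2)) = true ↔ _
    rw [pvGroupsGo_eq]
    simpa using step

theorem pvLemA_ge2 (l : List Char) (h2 : 2 ≤ l.length) :
    (((PySem.List.pyRange 1 ((l.length : Int) - 1) 1).any (fun i =>
         (PySem.List.pyGet? l i != PySem.List.pyGet? l (i - 1)) &&
         (PySem.List.pyGet? l i != PySem.List.pyGet? l (i + 1)))) = true
      ∨ ((PySem.List.pyGet? l 0 != PySem.List.pyGet? l 1) ||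
         (PySem.List.pyGet? l (-1) != PySem.List.pyGet? l (-2))) = true)
    ↔ ∃ i, pvLonely l i := by
  have e0 : PySem.List.pyGet? l 0 = l[0]? := PySem.List.pyGet?_zero l
  have e1 : PySem.List.pyGet? l 1 = l[1]? := by
    have := PySem.List.pyGet?_of_nonneg (xs := l) (i := 1) (by norm_num)
    simpa using this
  have em1 : PySem.List.pyGet? l (-1) = l[l.length - 1]? :=
    PySem.List.pyGet?_neg_ofNat l 1 (by norm_num) (by omega)
  have em2 : PySem.List.pyGet? l (-2) = l[l.length - 2]? :=
    PySem.List.pyGet?_neg_ofNat l 2 (by norm_num) h2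
  have hget : ∀ i : Nat, PySem.List.pyGet? l (i : Int) = l[i]? := fun i =>
    PySem.List.pyGet?_natCast l i
  rw [List.any_eq_true]
  constructor
  · rintro (⟨x, hx, hcond⟩ | hend)
    · rw [PySem.List.mem_pyRange_one] at hx
      obtain ⟨i, rfl, hi1, hi2⟩ : ∃ i : Nat, x = (i : Int) ∧ 1 ≤ i ∧ i + 1 < l.length :=
        ⟨x.toNat, by omega, by omega, by omega⟩
      rw [Bool.and_eq_true, bne_iff_ne, bne_iff_ne] at hcond
      obtain ⟨hL, hR⟩ := hcond
      have c1 : (i : Int) - 1 = ((i - 1 : Nat) : Int) := by omega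
      have c2 : (i : Int) + 1 = ((i + 1 : Nat) : Int) := by omega
      rw [hget, c1, hget] at hL
      rw [hget, c2, hget] at hR
      exact ⟨i, by omega, Or.inr (Ne.symm hL), Ne.symm hR⟩
    · rw [Bool.or_eq_true, bne_iff_ne, bne_iff_ne, e0, e1, em1, em2] at hend
      rcases hend with h | h
      · refine ⟨0, by omega, Or.inl rfl, Ne.symm h⟩
      · refine ⟨l.length - 1, by omega, Or.inr ?_, ?_⟩
        · have e : l.length - 1 - 1 = l.length - 2 := by omega
          rw [e]; exact Ne.symm h
        · have e : l.length - 1 + 1 = l.length := by omega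
          rw [e, List.getElem?_eq_none (by omega)]
          rw [List.getElem?_eq_getElem (by omega : l.length - 1 < l.length)]
          simp
  · rintro ⟨i, hi, hleft, hright⟩
    by_cases hi0 : i = 0
    · subst hi0
      right
      rw [Bool.or_eq_true, bne_iff_ne, bne_iff_ne, e0, e1]
      exact Or.inl (Ne.symm hright)
    · by_cases hilast : i = l.length - 1
      · subst hilast
        rcases hleft with h0 | hne
        · omega
        · right
          rw [Bool.or_eq_true, bne_iff_ne, bne_iff_ne, em1, em2]
          refine Or.inr ?_
          have e : l.length - 1 - 1 = l.length - 2 := by omega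
          rw [e] at hne
          exact Ne.symm hne
      · left
        refine ⟨(i : Int), ?_, ?_⟩
        · rw [PySem.List.mem_pyRange_one]; omega
        · rcases hleft with h0 | hne
          · omega
          · rw [Bool.and_eq_true, bne_iff_ne, bne_iff_ne]
            have c1 : (i : Int) - 1 = ((i - 1 : Nat) : Int) := by omega
            have c2 : (i : Int) + 1 = ((i + 1 : Nat) : Int) := by omega
            rw [hget, c1, hget, c2, hget]
            exact ⟨Ne.symm hne, Ne.symm hright⟩

theorem pvLemA (l : List Char) :
    (((PySem.List.pyRange 1 ((l.length : Int) - 1) 1).any (fun i =>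
         (PySem.List.pyGet? l i != PySem.List.pyGet? l (i - 1)) &&
         (PySem.List.pyGet? l i != PySem.List.pyGet? l (i + 1)))) = true
      ∨ ((PySem.List.pyGet? l 0 != PySem.List.pyGet? l 1) ||
         (PySem.List.pyGet? l (-1) != PySem.List.pyGet? l (-2))) = true)
    ↔ ∃ i, pvLonely l i := by
  match l with
  | [] =>
    constructor
    · intro h
      exfalso
      rcases h with h | h
      · rw [PySem.List.pyRange_one_eq_nil (by norm_num)] at h
        simp at h
      · simp [PySem.List.pyGet?, PySem.List.pyIdx?] at h
    · rintro ⟨i, hi, -⟩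
      simp at hi
  | [a] =>
    refine iff_of_true (Or.inr ?_) ⟨0, ?_⟩
    · simp [PySem.List.pyGet?, PySem.List.pyIdx?]
    · refine ⟨by norm_num, Or.inl rfl, ?_⟩
      simp
  | a :: b :: rest =>
    exact pvLemA_ge2 _ (by simp)

-- ===== VERDICT (by name: the statement is the Claim_ definition above) =====
theorem can_make_ladybugs_happy_spec : Claim_equal_can_make_ladybugs_happy := by
  intro board _ _
  unfold Spec_can_make_ladybugs_happy can_make_ladybugs_happy can_make_ladybugs_happy_alt
  simp only
  have hc : (if (PySem.Dict.counter board.toList).contains '_' then (PySem.Dict.counter board.toList).erase '_'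
      else PySem.Dict.counter board.toList) = (PySem.Dict.counter board.toList).erase '_' := by
    by_cases h : (PySem.Dict.counter board.toList).contains '_' = true
    · simp [h]
    · simp [h, pv_erase_not_contains _ _ (by simpa using h)]
  rw [hc]
  by_cases h1 : ((PySem.Dict.values ((PySem.Dict.counter board.toList).erase '_')).any (fun v => v == 1)) = true
  · rw [if_pos h1, if_pos h1]
  · rw [if_neg h1, if_neg h1]
    cases hI : PySem.Chars.isIn ['_'] board.toList with
    | true => rw [Bool.not_true, if_neg Bool.false_ne_true, if_neg Bool.false_ne_true]
    | false =>
      rw [Bool.not_false, if_pos rfl, if_pos rfl]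
      have hAB := (pvLemB board.toList).trans (pvLemA board.toList).symm
      by_cases hA1 : ((PySem.List.pyRange 1 ((board.toList.length : Int) - 1) 1).any (fun i =>
          (PySem.List.pyGet? board.toList i != PySem.List.pyGet? board.toList (i - 1)) &&
          (PySem.List.pyGet? board.toList i != PySem.List.pyGet? board.toList (i + 1)))) = true
      · rw [if_pos hA1, if_pos (hAB.mpr (Or.inl hA1))]
      · rw [if_neg hA1]
        by_cases hA2 : ((PySem.List.pyGet? board.toList 0 != PySem.List.pyGet? board.toList 1) ||
            (PySem.List.pyGet? board.toList (-1) != PySem.List.pyGet? board.toList (-2))) = true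
        · rw [if_pos hA2, if_pos (hAB.mpr (Or.inr hA2))]
        · rw [if_neg hA2, if_neg (fun h => (hAB.mp h).elim hA1 hA2)]
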